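-- pv_equiv track=rewrite | github.com/shvidkyu/fb-labs-2022 | cp_3/bondarenko_fb-03_kryhin_fb-03_cp3/decrypt.py | make_pairs
-- ===== SOURCE A (Python) =====
-- def make_pairs(llist: list, rlist: list) -> list:
--     bigram_pairs = list()
--     pairs = list()
--     for i in rlist:
--         for j in llist:
--             bigram_pairs.append((i, j))
--
--     for i in bigram_pairs:
--         for j in bigram_pairs:
--             pairs.append((i, j))
--     return pairs
-- ===== SOURCE B (Python) =====
-- def make_pairs(llist: list, rlist: list) -> list:
--     # single fused comprehension: no intermediate bigram table, one generation pass
--     return [((i, j), (i2, j2))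
--             for i in rlist
--             for j in llist
--             for i2 in rlist
--             for j2 in llist]
-- ===== Notes on version B (the rewrite author's own statement) =====
-- stated objective: simpler
-- what changed: B drops A's materialized intermediate bigram_pairs table and its subsequent double scan over that table, producing every result in one fused comprehension over rlist/llist directly.
import Mathlib
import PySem

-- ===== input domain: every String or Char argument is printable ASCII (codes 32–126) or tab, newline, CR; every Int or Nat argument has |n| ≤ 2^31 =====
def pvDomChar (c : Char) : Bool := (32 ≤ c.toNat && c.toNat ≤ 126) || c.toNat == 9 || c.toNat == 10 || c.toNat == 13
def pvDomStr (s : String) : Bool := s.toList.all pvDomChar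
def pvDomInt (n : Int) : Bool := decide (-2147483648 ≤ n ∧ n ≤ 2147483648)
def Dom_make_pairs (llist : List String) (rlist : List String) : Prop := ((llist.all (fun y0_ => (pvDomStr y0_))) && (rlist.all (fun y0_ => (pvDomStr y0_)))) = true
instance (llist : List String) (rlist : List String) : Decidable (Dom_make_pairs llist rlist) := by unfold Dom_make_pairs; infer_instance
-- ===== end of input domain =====

-- B drops A's materialized bigram_pairs table and its double scan, producing every result in one fused comprehension (objective: simpler).

-- ===== PORT A =====
-- A: builds bigram_pairs = (i,j) for i in rlist, j in llist by repeated append,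
-- then a second staged pass forms all ordered pairs of entries of that table.
def make_pairs (llist : List String) (rlist : List String) : List ((String × String) × (String × String)) :=
  let bigram_pairs : List (String × String) :=
    rlist.foldl (fun acc i => llist.foldl (fun acc j => acc ++ [(i, j)]) acc) []
  bigram_pairs.foldl (fun acc i => bigram_pairs.foldl (fun acc j => acc ++ [(i, j)]) acc) []

-- ===== PORT B =====
-- B: one fused comprehension, no intermediate table (flatMap/map is the comprehension)
def make_pairs_alt (llist : List String) (rlist : List String) : List ((String × String) × (String × String)) :=
  rlist.flatMap fun i =>
    llist.flatMap fun j =>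
      rlist.flatMap fun i2 =>
        llist.map fun j2 => ((i, j), (i2, j2))

-- ===== PRECONDITION & SPEC =====
def Spec_make_pairs (llist : List String) (rlist : List String) (out : List ((String × String) × (String × String))) : Prop := out = make_pairs_alt llist rlist
instance (llist : List String) (rlist : List String) (out : List ((String × String) × (String × String))) : Decidable (Spec_make_pairs llist rlist out) := by unfold Spec_make_pairs; infer_instance

-- ===== CLAIM (what is proved, stated in full; the proofs are below) =====
def Claim_equal_make_pairs : Prop := ∀ (llist : List String) (rlist : List String), Dom_make_pairs llist rlist → Spec_make_pairs llist rlist (make_pairs llist rlist)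

-- ===== LEMMAS AND PROOFS =====

lemma bigrams_eq (llist rlist : List String) :
    rlist.foldl (fun acc i => llist.foldl (fun acc j => acc ++ [(i, j)]) acc) ([] : List (String × String))
      = rlist.flatMap (fun i => llist.map (fun j => (i, j))) := by
  simp only [PySem.List.foldl_append_singleton_eq_map, PySem.List.foldl_append_eq_flatMap,
    List.nil_append]

lemma pairs_table_eq (bp : List (String × String)) :
    bp.foldl (fun acc i => bp.foldl (fun acc j => acc ++ [(i, j)]) acc) ([] : List ((String × String) × (String × String)))
      = bp.flatMap (fun i => bp.map (fun j => (i, j))) := by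
  simp only [PySem.List.foldl_append_singleton_eq_map, PySem.List.foldl_append_eq_flatMap,
    List.nil_append]

-- ===== VERDICT (by name: the statement is the Claim_ definition above) =====
theorem make_pairs_spec : Claim_equal_make_pairs := by
  intro llist rlist _
  show make_pairs llist rlist = make_pairs_alt llist rlist
  unfold make_pairs make_pairs_alt
  rw [bigrams_eq, pairs_table_eq]
  simp [List.flatMap_assoc, List.flatMap_map, List.map_flatMap, List.map_map, Function.comp_def]
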